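-- pv_equiv track=rewrite | github.com/ckoons/BubbleSpacetimeTheory | play/toy_439_jordan_crosslink.py | find_bichromatic_path
-- ===== SOURCE A (Python) =====
-- from collections import defaultdict, deque, Counter
--
-- def find_bichromatic_path(adj, color, u_start, u_end, c1, c2, exclude):
--     """Find if there's a (c1,c2)-path from u_start to u_end in G-exclude."""
--     if u_start == u_end: return True
--     visited = set()
--     queue = deque([u_start])
--     while queue:
--         u = queue.popleft()
--         if u in visited: continue
--         if u in exclude: continue
--         if color.get(u) not in (c1, c2): continue
--         visited.add(u)
--         if u == u_end: return True
--         for w in adj.get(u, set()):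
--             if w not in visited and w not in exclude and color.get(w) in (c1, c2):
--                 queue.append(w)
--     return False
-- ===== SOURCE B (Python) =====
-- def find_bichromatic_path(adj, color, u_start, u_end, c1, c2, exclude):
--     """Find if there's a (c1,c2)-path from u_start to u_end in G-exclude."""
--     if u_start == u_end:
--         return True
--     def valid(v):
--         return v not in exclude and color.get(v) in (c1, c2)
--     if not valid(u_start):
--         return False
--     reach = {u_start}
--     frontier = {u_start}
--     while frontier:
--         frontier = {w for v in frontier for w in adj.get(v, ()) if valid(w)} - reach
--         reach |= frontier
--     return u_end in reach
-- ===== Notes on version B (the rewrite author's own statement) =====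
-- stated objective: alternative
-- what changed: A's node-at-a-time FIFO-queue BFS with per-node visited/exclude/color guards is replaced by a level-wise frontier-set saturation: the validity test is factored out, checked once for the start node, and each round expands the whole frontier with one set comprehension minus the reached set.
import Mathlib
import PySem

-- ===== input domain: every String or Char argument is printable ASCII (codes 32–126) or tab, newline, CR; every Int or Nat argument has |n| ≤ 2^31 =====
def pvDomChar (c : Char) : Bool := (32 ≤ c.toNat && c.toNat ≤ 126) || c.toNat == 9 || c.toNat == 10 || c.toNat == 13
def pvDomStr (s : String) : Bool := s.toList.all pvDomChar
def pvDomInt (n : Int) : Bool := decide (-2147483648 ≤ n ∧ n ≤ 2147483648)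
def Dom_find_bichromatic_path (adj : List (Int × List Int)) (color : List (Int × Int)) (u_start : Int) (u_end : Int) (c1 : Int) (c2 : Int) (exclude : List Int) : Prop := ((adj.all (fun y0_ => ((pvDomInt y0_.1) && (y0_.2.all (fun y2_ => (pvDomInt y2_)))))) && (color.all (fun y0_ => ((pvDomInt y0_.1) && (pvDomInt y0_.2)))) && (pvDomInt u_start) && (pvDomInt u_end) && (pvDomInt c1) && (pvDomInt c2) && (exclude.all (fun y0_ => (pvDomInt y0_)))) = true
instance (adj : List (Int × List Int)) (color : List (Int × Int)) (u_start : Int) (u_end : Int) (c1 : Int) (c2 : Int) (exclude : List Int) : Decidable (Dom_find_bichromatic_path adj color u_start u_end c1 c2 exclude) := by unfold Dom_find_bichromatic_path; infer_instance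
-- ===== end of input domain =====

-- B replaces A's node-at-a-time FIFO queue BFS by a frontier-set saturation (whole-level set
-- comprehension per round) with the validity test factored out; objective: alternative decomposition.

-- shared helpers: dict lookups (first match, like Python dict.get)
def pvGetAdj (adj : List (Int × List Int)) (u : Int) : List Int := (adj.lookup u).getD []

def pvColorOk (color : List (Int × Int)) (c1 c2 u : Int) : Bool :=
  color.lookup u == some c1 || color.lookup u == some c2

-- used by the ports' termination proofs (cited in decreasing_by)
theorem pv_countP_lt {α : Type} (l : List α) (p q : α → Bool)
    (himp : ∀ x ∈ l, p x = true → q x = true)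
    (u : α) (hu : u ∈ l) (hq : q u = true) (hp : p u = false) :
    l.countP p < l.countP q := by
  induction l with
  | nil => cases hu
  | cons a t ih =>
    rw [List.countP_cons, List.countP_cons]
    rcases List.mem_cons.mp hu with h | h
    · subst h
      have hle : t.countP p ≤ t.countP q :=
        List.countP_mono_left (fun x hx => himp x (List.mem_cons_of_mem _ hx))
      rw [hp, hq]; simpa using Nat.lt_succ_of_le hle
    · have hlt := ih (fun x hx => himp x (List.mem_cons_of_mem _ hx)) h
      have : (if p a then 1 else 0) ≤ (if q a then 1 else 0) := by
        by_cases hpa : p a = true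
        · rw [hpa, himp a (List.mem_cons_self) hpa]
        · simp [Bool.eq_false_iff.mpr hpa]
      omega

theorem pvGetAdj_subset_flat (adj : List (Int × List Int)) (u x : Int)
    (hx : x ∈ pvGetAdj adj u) : x ∈ adj.flatMap (·.2) := by
  induction adj with
  | nil => simp [pvGetAdj, List.lookup] at hx
  | cons a t ih =>
    rw [List.mem_flatMap]
    unfold pvGetAdj at hx
    rw [List.lookup_cons] at hx
    cases h : (u == a.1) with
    | true =>
      refine ⟨a, List.mem_cons_self, ?_⟩
      simpa [h] using hx
    | false =>
      have hx' : x ∈ pvGetAdj t u := by simpa [pvGetAdj, h] using hx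
      rcases List.mem_flatMap.mp (ih hx') with ⟨b, hb, hxb⟩
      exact ⟨b, List.mem_cons_of_mem _ hb, hxb⟩


theorem pv_contains_mem {s : PySem.Set Int} {x : Int} : s.contains x = true ↔ x ∈ s := by
  simp

theorem pv_mono_add (s : PySem.Set Int) (u x : Int) (hx : (s.add u).contains x = false) :
    s.contains x = false := by
  cases hc : s.contains x with
  | false => rfl
  | true =>
    have : x ∈ s.add u := (PySem.Set.mem_add _ _ _).mpr (Or.inl (pv_contains_mem.mp hc))
    rw [pv_contains_mem.mpr this] at hx
    cases hx

theorem pv_mono_union (s : PySem.Set Int) (t : List Int) (x : Int)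
    (hx : (s.union t).contains x = false) : s.contains x = false := by
  cases hc : s.contains x with
  | false => rfl
  | true =>
    have : x ∈ s.union t := (PySem.Set.mem_union _ _ _).mpr (Or.inl (pv_contains_mem.mp hc))
    rw [pv_contains_mem.mpr this] at hx
    cases hx

-- ===== PORT A =====  (literal port of A's BFS: FIFO queue, per-node guards in the same order;
-- the cands/h arguments are proof-only, for termination)
def pvBfs (adj : List (Int × List Int)) (color : List (Int × Int)) (u_end c1 c2 : Int)
    (exclude : List Int) (cands : List Int)
    (hadj : ∀ u x, x ∈ pvGetAdj adj u → x ∈ cands)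
    (visited : PySem.Set Int) (queue : List Int) (hq : ∀ x ∈ queue, x ∈ cands) : Bool :=
  match queue with
  | [] => false
  | u :: rest =>
    if hv : visited.contains u then
      pvBfs adj color u_end c1 c2 exclude cands hadj visited rest
        (fun x hx => hq x (List.mem_cons_of_mem _ hx))
    else if exclude.contains u then
      pvBfs adj color u_end c1 c2 exclude cands hadj visited rest
        (fun x hx => hq x (List.mem_cons_of_mem _ hx))
    else if !pvColorOk color c1 c2 u then
      pvBfs adj color u_end c1 c2 exclude cands hadj visited rest
        (fun x hx => hq x (List.mem_cons_of_mem _ hx))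
    else
      let visited' := visited.add u
      if u = u_end then true
      else
        pvBfs adj color u_end c1 c2 exclude cands hadj visited'
          (rest ++ (pvGetAdj adj u).filter
            (fun w => !visited'.contains w && !exclude.contains w && pvColorOk color c1 c2 w))
          (fun x hx => by
            rcases List.mem_append.mp hx with h | h
            · exact hq x (List.mem_cons_of_mem _ h)
            · exact hadj u x (List.mem_of_mem_filter h))
  termination_by (cands.countP (fun x => !visited.contains x), queue.length)
  decreasing_by
  · exact Prod.Lex.right _ (Nat.lt_succ_self _)
  · exact Prod.Lex.right _ (Nat.lt_succ_self _)
  · exact Prod.Lex.right _ (Nat.lt_succ_self _)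
  · refine Prod.Lex.left _ _ ?_
    refine pv_countP_lt cands _ _ ?_ u (hq u List.mem_cons_self) ?_ ?_
    · intro x _ hx
      simp only [Bool.not_eq_true'] at hx ⊢
      exact pv_mono_add visited u x hx
    · simp only [Bool.not_eq_true']
      exact Bool.eq_false_iff.mpr hv
    · have : (visited.add u).contains u = true :=
        pv_contains_mem.mpr ((PySem.Set.mem_add _ _ _).mpr (Or.inr rfl))
      simp only [this, Bool.not_true]

def find_bichromatic_path (adj : List (Int × List Int)) (color : List (Int × Int)) (u_start : Int) (u_end : Int) (c1 : Int) (c2 : Int) (exclude : List Int) : Bool :=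
  if u_start = u_end then true
  else
    pvBfs adj color u_end c1 c2 exclude (u_start :: adj.flatMap (·.2))
      (fun u x hx => List.mem_cons_of_mem _ (pvGetAdj_subset_flat adj u x hx))
      PySem.Set.empty [u_start]
      (fun x hx => by rw [List.mem_singleton] at hx; exact hx ▸ List.mem_cons_self)

-- ===== PORT B =====  (literal port of Source B: factored validity test, whole-frontier saturation)
def pvValid (color : List (Int × Int)) (c1 c2 : Int) (exclude : List Int) (v : Int) : Bool :=
  !exclude.contains v && pvColorOk color c1 c2 v

def pvSat (adj : List (Int × List Int)) (color : List (Int × Int)) (u_end c1 c2 : Int)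
    (exclude : List Int) (reach : PySem.Set Int) (frontier : List Int) : Bool :=
  match frontier with
  | [] => reach.contains u_end
  | f :: fs =>
    let frontier' := PySem.Set.diff
      (PySem.Set.ofList ((f :: fs).flatMap
        (fun v => (pvGetAdj adj v).filter (fun w => pvValid color c1 c2 exclude w)))) reach
    pvSat adj color u_end c1 c2 exclude (PySem.Set.union reach frontier') frontier'
  termination_by ((adj.flatMap (·.2)).countP (fun x => !reach.contains x), frontier.length)
  decreasing_by
    rcases hf : PySem.Set.diff
      (PySem.Set.ofList ((f :: fs).flatMap
        (fun v => (pvGetAdj adj v).filter (fun w => pvValid color c1 c2 exclude w)))) reach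
      with _ | ⟨x, t⟩
    · exact Prod.Lex.right _ (Nat.succ_pos _)
    · refine Prod.Lex.left _ _ ?_
      rw [← hf]
      have hx : x ∈ PySem.Set.diff (PySem.Set.ofList ((f :: fs).flatMap
          (fun v => (pvGetAdj adj v).filter (fun w => pvValid color c1 c2 exclude w)))) reach := by
        rw [hf]; exact List.mem_cons_self
      have hx' := (PySem.Set.mem_diff _ _ _).mp hx
      have hxc : x ∈ adj.flatMap (·.2) := by
        rcases List.mem_flatMap.mp ((PySem.Set.mem_ofList _ _).mp hx'.1) with ⟨v, _, hxv⟩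
        exact pvGetAdj_subset_flat adj v x (List.mem_of_mem_filter hxv)
      refine pv_countP_lt _ _ _ ?_ x hxc ?_ ?_
      · intro y _ hy
        simp only [Bool.not_eq_true'] at hy ⊢
        exact pv_mono_union reach _ y hy
      · simp only [Bool.not_eq_true', Bool.eq_false_iff]
        intro hc
        exact hx'.2 (pv_contains_mem.mp hc)
      · have : (reach.union (PySem.Set.diff
            (PySem.Set.ofList ((f :: fs).flatMap
              (fun v => (pvGetAdj adj v).filter (fun w => pvValid color c1 c2 exclude w)))) reach)).contains x = true :=
          pv_contains_mem.mpr ((PySem.Set.mem_union _ _ _).mpr (Or.inr hx))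
        simp only [this, Bool.not_true]

def find_bichromatic_path_alt (adj : List (Int × List Int)) (color : List (Int × Int)) (u_start : Int) (u_end : Int) (c1 : Int) (c2 : Int) (exclude : List Int) : Bool :=
  if u_start = u_end then true
  else if !pvValid color c1 c2 exclude u_start then false
  else pvSat adj color u_end c1 c2 exclude (PySem.Set.ofList [u_start]) [u_start]

-- ===== PRECONDITION & SPEC =====
def Spec_find_bichromatic_path (adj : List (Int × List Int)) (color : List (Int × Int)) (u_start : Int) (u_end : Int) (c1 : Int) (c2 : Int) (exclude : List Int) (out : Bool) : Prop := out = find_bichromatic_path_alt adj color u_start u_end c1 c2 exclude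
instance (adj : List (Int × List Int)) (color : List (Int × Int)) (u_start : Int) (u_end : Int) (c1 : Int) (c2 : Int) (exclude : List Int) (out : Bool) : Decidable (Spec_find_bichromatic_path adj color u_start u_end c1 c2 exclude out) := by unfold Spec_find_bichromatic_path; infer_instance

-- ===== CLAIM (what is proved, stated in full; the proofs are below) =====
def Claim_equal_find_bichromatic_path : Prop := ∀ (adj : List (Int × List Int)) (color : List (Int × Int)) (u_start : Int) (u_end : Int) (c1 : Int) (c2 : Int) (exclude : List Int), Dom_find_bichromatic_path adj color u_start u_end c1 c2 exclude → Spec_find_bichromatic_path adj color u_start u_end c1 c2 exclude (find_bichromatic_path adj color u_start u_end c1 c2 exclude)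

-- ===== LEMMAS AND PROOFS =====

-- paths through valid nodes only (both endpoints valid)
inductive pvPath (adj : List (Int × List Int)) (valid : Int → Bool) : Int → Int → Prop
  | refl (u : Int) (h : valid u = true) : pvPath adj valid u u
  | step {u v w : Int} (h : pvPath adj valid u v) (hw : w ∈ pvGetAdj adj v) (hv : valid w = true) :
      pvPath adj valid u w

theorem pvPath_valid_left {adj : List (Int × List Int)} {valid : Int → Bool} {a b : Int}
    (h : pvPath adj valid a b) : valid a = true := by
  induction h with
  | refl h => exact h
  | step _ _ _ ih => exact ih

theorem pv_closed_path {adj : List (Int × List Int)} {valid : Int → Bool} {S : List Int}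
    (hclosed : ∀ v ∈ S, ∀ w ∈ pvGetAdj adj v, valid w = true → w ∈ S)
    {a b : Int} (hp : pvPath adj valid a b) (ha : a ∈ S) : b ∈ S := by
  induction hp with
  | refl h => exact ha
  | step h hw hv ih => exact hclosed _ ih _ hw hv

theorem pv_valid_decomp {color : List (Int × Int)} {c1 c2 : Int} {exclude : List Int} {u : Int}
    (he : ¬exclude.contains u = true) (hc : pvColorOk color c1 c2 u = true) :
    pvValid color c1 c2 exclude u = true := by
  have hm : u ∉ exclude := by simpa using he
  simp [pvValid, hc, hm]

theorem pv_valid_split {color : List (Int × Int)} {c1 c2 : Int} {exclude : List Int} {u : Int}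
    (h : pvValid color c1 c2 exclude u = true) :
    exclude.contains u = false ∧ pvColorOk color c1 c2 u = true := by
  unfold pvValid at h
  rcases Bool.and_eq_true .. |>.mp h with ⟨h1, h2⟩
  exact ⟨Bool.not_eq_true' .. |>.mp h1, h2⟩

theorem pvBfs_sound (adj : List (Int × List Int)) (color : List (Int × Int)) (u_end c1 c2 : Int)
    (exclude : List Int) (cands : List Int) (hadj : ∀ u x, x ∈ pvGetAdj adj u → x ∈ cands)
    (visited : PySem.Set Int) (queue : List Int) (hq : ∀ x ∈ queue, x ∈ cands) (s : Int)
    (hP : ∀ x ∈ queue, pvValid color c1 c2 exclude x = true →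
      pvPath adj (pvValid color c1 c2 exclude) s x)
    (htrue : pvBfs adj color u_end c1 c2 exclude cands hadj visited queue hq = true) :
    pvPath adj (pvValid color c1 c2 exclude) s u_end := by
  fun_induction pvBfs adj color u_end c1 c2 exclude cands hadj visited queue hq with
  | case1 => cases htrue
  | case2 visited u rest hq0 h hq1 ih =>
    exact ih (fun x hx hv => hP x (List.mem_cons_of_mem _ hx) hv) htrue
  | case3 visited u rest hq0 h1 h2 hq1 ih =>
    exact ih (fun x hx hv => hP x (List.mem_cons_of_mem _ hx) hv) htrue
  | case4 visited u rest hq0 h1 h2 h3 hq1 ih =>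
    exact ih (fun x hx hv => hP x (List.mem_cons_of_mem _ hx) hv) htrue
  | case5 visited rest hq0 h1 h2 h3 v' =>
    refine hP u_end List.mem_cons_self (pv_valid_decomp h2 ?_)
    simpa using h3
  | case6 visited u rest hq0 h1 h2 h3 v' hne hq1 ih =>
    have hcu : pvColorOk color c1 c2 u = true := by simpa using h3
    have hvu : pvValid color c1 c2 exclude u = true := pv_valid_decomp h2 hcu
    refine ih ?_ htrue
    intro x hx hvx
    rcases List.mem_append.mp hx with h | h
    · exact hP x (List.mem_cons_of_mem _ h) hvx
    · exact pvPath.step (hP u List.mem_cons_self hvu) (List.mem_of_mem_filter h) hvx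

theorem pvBfs_false (adj : List (Int × List Int)) (color : List (Int × Int)) (u_end c1 c2 : Int)
    (exclude : List Int) (cands : List Int) (hadj : ∀ u x, x ∈ pvGetAdj adj u → x ∈ cands)
    (visited : PySem.Set Int) (queue : List Int) (hq : ∀ x ∈ queue, x ∈ cands)
    (hfalse : pvBfs adj color u_end c1 c2 exclude cands hadj visited queue hq = false)
    (hvis : ∀ v ∈ visited, pvValid color c1 c2 exclude v = true ∧
      ∀ w ∈ pvGetAdj adj v, pvValid color c1 c2 exclude w = true → (w ∈ visited ∨ w ∈ queue))
    (hend : u_end ∉ visited) :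
    ∀ v, (v ∈ visited ∨ v ∈ queue) → pvValid color c1 c2 exclude v = true →
      ∀ w, pvPath adj (pvValid color c1 c2 exclude) v w → w ≠ u_end := by
  fun_induction pvBfs adj color u_end c1 c2 exclude cands hadj visited queue hq with
  | case1 visited hq0 hq1 =>
    intro v hv hval w hp hwe
    have hv' : v ∈ visited := by
      rcases hv with h | h
      · exact h
      · cases h
    have hclosed : ∀ a ∈ visited, ∀ b ∈ pvGetAdj adj a,
        pvValid color c1 c2 exclude b = true → b ∈ visited := by
      intro a ha b hb hvb
      rcases (hvis a ha).2 b hb hvb with h | h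
      · exact h
      · cases h
    exact hend (hwe ▸ pv_closed_path hclosed hp hv')
  | case2 visited u rest hq0 h hq1 ih =>
    have hu : u ∈ visited := pv_contains_mem.mp h
    have hvis' : ∀ v ∈ visited, pvValid color c1 c2 exclude v = true ∧
        ∀ w ∈ pvGetAdj adj v, pvValid color c1 c2 exclude w = true → (w ∈ visited ∨ w ∈ rest) := by
      intro v hv
      refine ⟨(hvis v hv).1, fun w hw hvw => ?_⟩
      rcases (hvis v hv).2 w hw hvw with h' | h'
      · exact Or.inl h'
      · rcases List.mem_cons.mp h' with rfl | h''
        · exact Or.inl hu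
        · exact Or.inr h''
    intro v hv hval
    refine ih hfalse hvis' hend v ?_ hval
    rcases hv with h' | h'
    · exact Or.inl h'
    · rcases List.mem_cons.mp h' with rfl | h''
      · exact Or.inl hu
      · exact Or.inr h''
  | case3 visited u rest hq0 h1 h2 hq1 ih =>
    have hu : pvValid color c1 c2 exclude u = false := by
      have hm : u ∈ exclude := by simpa using h2
      simp [pvValid, hm]
    have hvis' : ∀ v ∈ visited, pvValid color c1 c2 exclude v = true ∧
        ∀ w ∈ pvGetAdj adj v, pvValid color c1 c2 exclude w = true → (w ∈ visited ∨ w ∈ rest) := by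
      intro v hv
      refine ⟨(hvis v hv).1, fun w hw hvw => ?_⟩
      rcases (hvis v hv).2 w hw hvw with h' | h'
      · exact Or.inl h'
      · rcases List.mem_cons.mp h' with rfl | h''
        · rw [hu] at hvw; cases hvw
        · exact Or.inr h''
    intro v hv hval
    refine ih hfalse hvis' hend v ?_ hval
    rcases hv with h' | h'
    · exact Or.inl h'
    · rcases List.mem_cons.mp h' with rfl | h''
      · rw [hu] at hval; cases hval
      · exact Or.inr h''
  | case4 visited u rest hq0 h1 h2 h3 hq1 ih =>
    have hcu : pvColorOk color c1 c2 u = false := by simpa using h3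
    have hu : pvValid color c1 c2 exclude u = false := by
      simp [pvValid, hcu]
    have hvis' : ∀ v ∈ visited, pvValid color c1 c2 exclude v = true ∧
        ∀ w ∈ pvGetAdj adj v, pvValid color c1 c2 exclude w = true → (w ∈ visited ∨ w ∈ rest) := by
      intro v hv
      refine ⟨(hvis v hv).1, fun w hw hvw => ?_⟩
      rcases (hvis v hv).2 w hw hvw with h' | h'
      · exact Or.inl h'
      · rcases List.mem_cons.mp h' with rfl | h''
        · rw [hu] at hvw; cases hvw
        · exact Or.inr h''
    intro v hv hval
    refine ih hfalse hvis' hend v ?_ hval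
    rcases hv with h' | h'
    · exact Or.inl h'
    · rcases List.mem_cons.mp h' with rfl | h''
      · rw [hu] at hval; cases hval
      · exact Or.inr h''
  | case5 visited rest hq0 h1 h2 h3 v' => cases hfalse
  | case6 visited u rest hq0 h1 h2 h3 v' hne hq1 ih =>
    have hcu : pvColorOk color c1 c2 u = true := by simpa using h3
    have hvu : pvValid color c1 c2 exclude u = true := pv_valid_decomp h2 hcu
    have hend' : u_end ∉ visited.add u := by
      intro hmem
      rcases (PySem.Set.mem_add _ _ _).mp hmem with h' | h'
      · exact hend h'
      · exact hne h'.symm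
    have hvis' : ∀ v ∈ visited.add u, pvValid color c1 c2 exclude v = true ∧
        ∀ w ∈ pvGetAdj adj v, pvValid color c1 c2 exclude w = true →
          (w ∈ visited.add u ∨ w ∈ rest ++ (pvGetAdj adj u).filter
            (fun w => !(visited.add u).contains w && !exclude.contains w &&
              pvColorOk color c1 c2 w)) := by
      intro v hv
      rcases (PySem.Set.mem_add _ _ _).mp hv with hv' | rfl
      · refine ⟨(hvis v hv').1, fun w hw hvw => ?_⟩
        rcases (hvis v hv').2 w hw hvw with h' | h'
        · exact Or.inl ((PySem.Set.mem_add _ _ _).mpr (Or.inl h'))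
        · rcases List.mem_cons.mp h' with rfl | h''
          · exact Or.inl ((PySem.Set.mem_add _ _ _).mpr (Or.inr rfl))
          · exact Or.inr (List.mem_append.mpr (Or.inl h''))
      · refine ⟨hvu, fun w hw hvw => ?_⟩
        by_cases hwv : w ∈ visited.add v
        · exact Or.inl hwv
        · refine Or.inr (List.mem_append.mpr (Or.inr (List.mem_filter.mpr ⟨hw, ?_⟩)))
          rcases pv_valid_split hvw with ⟨he, hc⟩
          have h1' : w ∉ visited ∧ ¬w = v := by
            constructor
            · intro hm; exact hwv ((PySem.Set.mem_add _ _ _).mpr (Or.inl hm))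
            · intro hm; exact hwv ((PySem.Set.mem_add _ _ _).mpr (Or.inr hm))
          have h2' : w ∉ exclude := by simpa using he
          simp [hc]
          exact ⟨h1', h2'⟩
    intro v hv hval
    refine ih hfalse hvis' hend' v ?_ hval
    rcases hv with h' | h'
    · exact Or.inl ((PySem.Set.mem_add _ _ _).mpr (Or.inl h'))
    · rcases List.mem_cons.mp h' with rfl | h''
      · exact Or.inl ((PySem.Set.mem_add _ _ _).mpr (Or.inr rfl))
      · exact Or.inr (List.mem_append.mpr (Or.inl h''))

theorem A_iff (adj : List (Int × List Int)) (color : List (Int × Int)) (u_start u_end c1 c2 : Int)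
    (exclude : List Int) :
    find_bichromatic_path adj color u_start u_end c1 c2 exclude = true ↔
      (u_start = u_end ∨ pvPath adj (pvValid color c1 c2 exclude) u_start u_end) := by
  unfold find_bichromatic_path
  by_cases hse : u_start = u_end
  · simp [hse]
  · rw [if_neg hse]
    constructor
    · intro htrue
      refine Or.inr (pvBfs_sound adj color u_end c1 c2 exclude _ _ _ _ _ u_start ?_ htrue)
      intro x hx hvx
      rw [List.mem_singleton] at hx
      exact hx ▸ pvPath.refl x hvx
    · rintro (h | hpath)
      · exact absurd h hse
      · by_contra hnot
        have hfalse := Bool.eq_false_iff.mpr hnot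
        have hvempty : ∀ v ∈ (PySem.Set.empty : PySem.Set Int),
            pvValid color c1 c2 exclude v = true ∧
            ∀ w ∈ pvGetAdj adj v, pvValid color c1 c2 exclude w = true →
              (w ∈ (PySem.Set.empty : PySem.Set Int) ∨ w ∈ [u_start]) := by
          intro v hv
          cases hv
        have := pvBfs_false adj color u_end c1 c2 exclude _ _ _ _ _ hfalse hvempty
          (by intro h; cases h) u_start (Or.inr List.mem_cons_self)
          (pvPath_valid_left hpath) u_end hpath
        exact this rfl

theorem pvSat_sound (adj : List (Int × List Int)) (color : List (Int × Int)) (u_end c1 c2 : Int)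
    (exclude : List Int) (reach : PySem.Set Int) (frontier : List Int) (s : Int)
    (hreach : ∀ v ∈ reach, pvPath adj (pvValid color c1 c2 exclude) s v)
    (hfr : ∀ v ∈ frontier, v ∈ reach)
    (htrue : pvSat adj color u_end c1 c2 exclude reach frontier = true) :
    pvPath adj (pvValid color c1 c2 exclude) s u_end := by
  fun_induction pvSat adj color u_end c1 c2 exclude reach frontier with
  | case1 reach => exact hreach u_end (pv_contains_mem.mp htrue)
  | case2 reach f fs frontier' ih =>
    refine ih ?_ ?_ htrue
    · intro v hv
      rcases (PySem.Set.mem_union _ _ _).mp hv with h | h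
      · exact hreach v h
      · rcases (PySem.Set.mem_diff _ _ _).mp h with ⟨h1, _⟩
        rcases List.mem_flatMap.mp ((PySem.Set.mem_ofList _ _).mp h1) with ⟨v0, hv0, hvf⟩
        rcases List.mem_filter.mp hvf with ⟨hadj0, hval0⟩
        exact pvPath.step (hreach v0 (hfr v0 hv0)) hadj0 hval0
    · intro v hv
      exact (PySem.Set.mem_union _ _ _).mpr (Or.inr hv)

theorem pvSat_false (adj : List (Int × List Int)) (color : List (Int × Int)) (u_end c1 c2 : Int)
    (exclude : List Int) (reach : PySem.Set Int) (frontier : List Int)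
    (hfalse : pvSat adj color u_end c1 c2 exclude reach frontier = false)
    (hs : ∀ v ∈ reach, v ∈ frontier ∨ ∀ w ∈ pvGetAdj adj v,
      pvValid color c1 c2 exclude w = true → w ∈ reach) :
    ∀ a ∈ reach, ∀ b, pvPath adj (pvValid color c1 c2 exclude) a b → b ≠ u_end := by
  fun_induction pvSat adj color u_end c1 c2 exclude reach frontier with
  | case1 reach =>
    intro a ha b hp hbe
    have hclosed : ∀ v ∈ reach, ∀ w ∈ pvGetAdj adj v,
        pvValid color c1 c2 exclude w = true → w ∈ reach := by
      intro v hv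
      rcases hs v hv with h | h
      · cases h
      · exact h
    have hb : b ∈ reach := pv_closed_path hclosed hp ha
    rw [hbe] at hb
    rw [pv_contains_mem.mpr hb] at hfalse
    cases hfalse
  | case2 reach f fs frontier' ih =>
    have hs' : ∀ v ∈ reach.union frontier', v ∈ frontier' ∨
        ∀ w ∈ pvGetAdj adj v, pvValid color c1 c2 exclude w = true →
          w ∈ reach.union frontier' := by
      intro v hv
      rcases (PySem.Set.mem_union _ _ _).mp hv with hv' | hv'
      · rcases hs v hv' with h | h
        · refine Or.inr fun w hw hvw => ?_
          by_cases hwr : w ∈ reach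
          · exact (PySem.Set.mem_union _ _ _).mpr (Or.inl hwr)
          · refine (PySem.Set.mem_union _ _ _).mpr (Or.inr ?_)
            refine (PySem.Set.mem_diff _ _ _).mpr ⟨?_, hwr⟩
            refine (PySem.Set.mem_ofList _ _).mpr (List.mem_flatMap.mpr ⟨v, h, ?_⟩)
            exact List.mem_filter.mpr ⟨hw, hvw⟩
        · exact Or.inr fun w hw hvw =>
            (PySem.Set.mem_union _ _ _).mpr (Or.inl (h w hw hvw))
      · exact Or.inl hv'
    intro a ha
    exact ih hfalse hs' a ((PySem.Set.mem_union _ _ _).mpr (Or.inl ha))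

theorem B_iff (adj : List (Int × List Int)) (color : List (Int × Int)) (u_start u_end c1 c2 : Int)
    (exclude : List Int) :
    find_bichromatic_path_alt adj color u_start u_end c1 c2 exclude = true ↔
      (u_start = u_end ∨ pvPath adj (pvValid color c1 c2 exclude) u_start u_end) := by
  unfold find_bichromatic_path_alt
  by_cases hse : u_start = u_end
  · simp [hse]
  · rw [if_neg hse]
    by_cases hval : pvValid color c1 c2 exclude u_start = true
    · rw [if_neg (by simp [hval])]
      have hofl : (PySem.Set.ofList [u_start] : PySem.Set Int) = [u_start] := rfl
      constructor
      · intro htrue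
        refine Or.inr (pvSat_sound adj color u_end c1 c2 exclude _ _ u_start ?_ ?_ htrue)
        · intro v hv
          rw [hofl, List.mem_singleton] at hv
          subst hv
          exact pvPath.refl _ hval
        · intro v hv
          rw [hofl]
          exact hv
      · rintro (h | hpath)
        · exact absurd h hse
        · by_contra hnot
          have hfalse := Bool.eq_false_iff.mpr hnot
          have hs : ∀ v ∈ (PySem.Set.ofList [u_start] : PySem.Set Int),
              v ∈ [u_start] ∨ ∀ w ∈ pvGetAdj adj v,
                pvValid color c1 c2 exclude w = true →
                  w ∈ (PySem.Set.ofList [u_start] : PySem.Set Int) := by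
            intro v hv
            rw [hofl] at hv
            exact Or.inl hv
          refine pvSat_false adj color u_end c1 c2 exclude _ _ hfalse hs u_start ?_ u_end hpath rfl
          rw [hofl]
          exact List.mem_cons_self
    · rw [if_pos (by simp [Bool.eq_false_iff.mpr hval])]
      constructor
      · intro h; cases h
      · rintro (h | hpath)
        · exact absurd h hse
        · exact absurd (pvPath_valid_left hpath) hval

-- ===== VERDICT (by name: the statement is the Claim_ definition above) =====
theorem find_bichromatic_path_spec : Claim_equal_find_bichromatic_path := by
  intro adj color u_start u_end c1 c2 exclude _
  show _ = _
  rw [Bool.eq_iff_iff, A_iff, B_iff]
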